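-- pv_equiv track=rewrite | github.com/RichardBangs/adventofcode2023 | 2023/day7/main.py | getNumberPairs
-- ===== SOURCE A (Python) =====
-- def getNumberPairs(hand):
--
-- 	sortedHand : [char] = []
-- 	for char in hand:
-- 		sortedHand.append(char)
-- 	sortedHand.sort()
--
-- 	current = 0
-- 	pairs = 0
--
-- 	for index in range(1, len(sortedHand)):
--
-- 		if(sortedHand[index] == sortedHand[index-1]):
-- 			current += 1
-- 		else:
-- 			if(current >= 1):
-- 				pairs += 1
--
-- 			current = 0
--
-- 	if(current >= 1):
-- 		pairs += 1
--
-- 	return pairs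
-- ===== SOURCE B (Python) =====
-- def getNumberPairs(hand):
-- 	counts = {}
-- 	for char in hand:
-- 		counts[char] = counts.get(char, 0) + 1
--
-- 	pairs = 0
-- 	for count in counts.values():
-- 		if count >= 2:
-- 			pairs += 1
--
-- 	return pairs
-- ===== Notes on version B (the rewrite author's own statement) =====
-- stated objective: faster
-- what changed: B replaces the sort plus adjacent-run scan with a single frequency-dict tally pass followed by counting the buckets of size >= 2.
import Mathlib
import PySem

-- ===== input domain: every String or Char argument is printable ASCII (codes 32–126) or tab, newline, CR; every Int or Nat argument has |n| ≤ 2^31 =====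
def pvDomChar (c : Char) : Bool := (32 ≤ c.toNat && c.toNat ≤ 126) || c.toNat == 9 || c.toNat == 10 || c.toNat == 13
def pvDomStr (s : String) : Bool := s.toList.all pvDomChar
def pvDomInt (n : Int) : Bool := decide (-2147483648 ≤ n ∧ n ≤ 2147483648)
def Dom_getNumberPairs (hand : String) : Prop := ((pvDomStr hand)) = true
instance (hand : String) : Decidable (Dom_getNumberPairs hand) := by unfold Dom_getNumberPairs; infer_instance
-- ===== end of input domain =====

-- B replaces A's sort + adjacent-run scan by one frequency-dict tally pass and a count of buckets of size ≥ 2.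

-- ===== PORT A =====
def getNumberPairs (hand : String) : Int :=
  let sortedHand : List Char :=
    PySem.List.sorted (hand.toList.foldl (fun acc char => acc ++ [char]) []) (fun c => c)
  let st : Int × Int :=
    (PySem.List.pyRange 1 (sortedHand.length : Int)).foldl
      (fun (st : Int × Int) index =>
        if PySem.List.pyGetD sortedHand index ' ' == PySem.List.pyGetD sortedHand (index - 1) ' ' then
          (st.1 + 1, st.2)
        else
          (0, if st.1 ≥ 1 then st.2 + 1 else st.2))
      (0, 0)
  if st.1 ≥ 1 then st.2 + 1 else st.2

-- ===== PORT B =====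
def getNumberPairs_alt (hand : String) : Int :=
  let counts : PySem.Dict Char Int :=
    hand.toList.foldl (fun (d : PySem.Dict Char Int) char => d.insert char (d.getD char 0 + 1))
      PySem.Dict.empty
  counts.values.foldl (fun pairs count => if count ≥ 2 then pairs + 1 else pairs) 0

-- ===== PRECONDITION & SPEC =====
def Spec_getNumberPairs (hand : String) (out : Int) : Prop := out = getNumberPairs_alt hand
instance (hand : String) (out : Int) : Decidable (Spec_getNumberPairs hand out) := by unfold Spec_getNumberPairs; infer_instance

-- ===== CLAIM (what is proved, stated in full; the proofs are below) =====
def Claim_equal_getNumberPairs : Prop := ∀ (hand : String), Dom_getNumberPairs hand → Spec_getNumberPairs hand (getNumberPairs hand)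

-- ===== LEMMAS AND PROOFS =====

-- Number of distinct characters of m occurring at least twice (the common value of both programs).
def pairsOf (m : List Char) : Int :=
  ((PySem.List.dedup m).countP (fun c => decide (2 ≤ m.count c)) : Int)

-- A's scan loop restated structurally: prev = previously seen char, state = (current, pairs).
def auxRun : Char → Int × Int → List Char → Int × Int
  | _, st, [] => st
  | prev, st, y :: ys =>
      auxRun y (if y == prev then (st.1 + 1, st.2) else (0, if st.1 ≥ 1 then st.2 + 1 else st.2)) ys

-- countP is determined by membership (on nodup lists) and the predicate's values on members.
lemma countP_nodup_ext {l₁ l₂ : List Char} (p q : Char → Bool)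
    (h₁ : l₁.Nodup) (h₂ : l₂.Nodup) (hmem : ∀ c, c ∈ l₁ ↔ c ∈ l₂)
    (hpq : ∀ c ∈ l₂, p c = q c) :
    l₁.countP p = l₂.countP q := by
  rw [((List.perm_ext_iff_of_nodup h₁ h₂).mpr hmem).countP_eq]
  exact List.countP_congr (fun c hc => by rw [hpq c hc])

lemma pairsOf_perm {m m' : List Char} (h : m.Perm m') : pairsOf m = pairsOf m' := by
  unfold pairsOf
  congr 1
  refine countP_nodup_ext _ _ (PySem.List.nodup_dedup m) (PySem.List.nodup_dedup m')
    (fun c => by rw [PySem.List.mem_dedup, PySem.List.mem_dedup]; exact h.mem_iff)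
    (fun c _ => by rw [h.count_eq])

lemma pairsOf_cons (y : Char) (ys : List Char) :
    pairsOf (y :: ys)
      = (if 1 ≤ ys.count y then 1 else 0) + pairsOf (ys.filter (fun c => !(c == y))) := by
  unfold pairsOf
  rw [PySem.List.dedup_eq_ofList, PySem.Set.ofList_cons, List.countP_cons]
  have hrest : ((PySem.Set.ofList ys).discard y).countP (fun c => decide (2 ≤ (y :: ys).count c))
      = (PySem.List.dedup (ys.filter (fun c => !(c == y)))).countP
          (fun c => decide (2 ≤ (ys.filter (fun c => !(c == y))).count c)) := by
    refine countP_nodup_ext _ _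
      (PySem.Set.nodup_discard _ _ (PySem.Set.nodup_ofList ys))
      (PySem.List.nodup_dedup _) (fun c => ?_) (fun c hc => ?_)
    · rw [PySem.Set.mem_discard, PySem.Set.mem_ofList, PySem.List.mem_dedup, List.mem_filter]
      simp
    · rw [PySem.List.mem_dedup, List.mem_filter] at hc
      obtain ⟨hcy, hne⟩ := hc
      have hne' : c ≠ y := by simpa using hne
      rw [List.count_filter (by simpa using hne')]
      simp [Ne.symm hne']
  rw [hrest]
  have hy : (decide (2 ≤ (y :: ys).count y)) = decide (1 ≤ ys.count y) := by
    rw [List.count_cons_self]; exact decide_eq_decide.mpr (by omega)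
  rw [hy]
  by_cases h : 1 ≤ ys.count y
  all_goals simp [h]
  all_goals omega

-- A's index loop over the sorted list equals the structural scan auxRun.
lemma bridge : ∀ (t pre : List Char) (a : Char) (st : Int × Int),
    (PySem.List.pyRange ((pre.length : Int) + 1) (((pre ++ a :: t).length : Int))).foldl
      (fun (st : Int × Int) index =>
        if PySem.List.pyGetD (pre ++ a :: t) index ' ' == PySem.List.pyGetD (pre ++ a :: t) (index - 1) ' ' then
          (st.1 + 1, st.2)
        else
          (0, if st.1 ≥ 1 then st.2 + 1 else st.2)) st
    = auxRun a st t := by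
  intro t
  induction t with
  | nil =>
    intro pre a st
    rw [PySem.List.pyRange_one_eq_nil (by simp)]
    simp [auxRun]
  | cons y ys ih =>
    intro pre a st
    rw [PySem.List.pyRange_one_cons (by simp)]
    rw [List.foldl_cons]
    have e1 : PySem.List.pyGetD (pre ++ a :: y :: ys) ((pre.length : Int) + 1) ' ' = y := by
      rw [PySem.List.pyGetD_of_nonneg _ _ (by omega)]
      have : ((pre.length : Int) + 1).toNat = pre.length + 1 := by omega
      rw [this, List.getD_append_right _ _ _ _ (by omega)]
      simp
    have e2 : PySem.List.pyGetD (pre ++ a :: y :: ys) ((pre.length : Int) + 1 - 1) ' ' = a := by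
      have : (pre.length : Int) + 1 - 1 = (pre.length : Int) := by ring
      rw [this, PySem.List.pyGetD_of_nonneg _ _ (by omega)]
      have : ((pre.length : Int)).toNat = pre.length := by omega
      rw [this, List.getD_append_right _ _ _ _ (by omega)]
      simp
    rw [e1, e2]
    have hsplit : pre ++ a :: y :: ys = (pre ++ [a]) ++ y :: ys := by simp
    have hlen : (pre.length : Int) + 1 + 1 = (((pre ++ [a]).length : Int) + 1) := by simp
    have := ih (pre ++ [a]) y
      (if y == a then (st.1 + 1, st.2) else (0, if st.1 ≥ 1 then st.2 + 1 else st.2))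
    rw [← hsplit, ← hlen] at this
    simp only [auxRun]
    exact this

-- the scan over a sorted (≤-pairwise) tail counts runs of length ≥ 2.
lemma auxRun_pairs : ∀ (l : List Char) (prev : Char) (cur pairs : Int),
    (prev :: l).Pairwise (· ≤ ·) →
    (if (auxRun prev (cur, pairs) l).1 ≥ 1 then (auxRun prev (cur, pairs) l).2 + 1
     else (auxRun prev (cur, pairs) l).2)
      = pairs + ((if 1 ≤ cur + (l.count prev : Int) then 1 else 0)
          + pairsOf (l.filter (fun c => !(c == prev)))) := by
  intro l
  induction l with
  | nil =>
    intro prev cur pairs _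
    simp only [auxRun, List.count_nil, List.filter_nil]
    have : pairsOf [] = 0 := rfl
    rw [this]
    split_ifs <;> omega
  | cons y ys ih =>
    intro prev cur pairs hp
    by_cases hy : y = prev
    · subst hy
      simp only [auxRun, BEq.rfl, if_true]
      have hp' : (y :: ys).Pairwise (· ≤ ·) :=
        hp.sublist (by simp)
      rw [ih y (cur + 1) pairs hp']
      simp only [List.count_cons_self, List.filter_cons, BEq.rfl]
      simp only [Bool.not_true, if_neg (by simp : ¬ (false = true))]
      push_cast
      have : cur + 1 + (ys.count y : Int) = cur + ((ys.count y : Int) + 1) := by ring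
      rw [this]
    · have hbeq : (y == prev) = false := by simp [hy]
      rcases List.pairwise_cons.mp hp with ⟨hle, hp'⟩
      have hyprev : prev < y := lt_of_le_of_ne (hle y (by simp)) (fun h => hy h.symm)
      have hnotmem : prev ∉ y :: ys := by
        intro hmem
        rcases List.mem_cons.mp hmem with h | h
        · exact hy h.symm
        · exact absurd ((List.pairwise_cons.mp hp').1 prev h) (by
            intro hle2
            exact absurd (lt_of_lt_of_le hyprev hle2) (lt_irrefl prev))
      simp only [auxRun, hbeq, Bool.false_eq_true, if_false]
      rw [ih y 0 (if cur ≥ 1 then pairs + 1 else pairs) hp']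
      have hcount : (y :: ys).count prev = 0 := List.count_eq_zero.mpr hnotmem
      have hfilter : (y :: ys).filter (fun c => !(c == prev)) = y :: ys :=
        List.filter_eq_self.mpr (fun c hc => by
          simp only [Bool.not_eq_true']
          exact beq_eq_false_iff_ne.mpr (fun h => hnotmem (h ▸ hc)))
      rw [hcount, hfilter, pairsOf_cons]
      split_ifs <;> omega

lemma A_eq_pairsOf (hand : String) : getNumberPairs hand = pairsOf hand.toList := by
  unfold getNumberPairs
  rw [PySem.List.foldl_append_singleton, List.nil_append]
  have hperm : (PySem.List.sorted hand.toList (fun c => c)).Perm hand.toList :=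
    PySem.List.sorted_perm hand.toList (fun c => c) false
  rw [← pairsOf_perm hperm]
  cases hs : PySem.List.sorted hand.toList (fun c => c) with
  | nil =>
    simp only [List.length_nil, Nat.cast_zero]
    rw [PySem.List.pyRange_one_eq_nil (by norm_num)]
    simp [pairsOf, PySem.List.dedup]
  | cons a t =>
    dsimp only
    have hb := bridge t [] a ((0 : Int), (0 : Int))
    simp only [List.length_nil, Nat.cast_zero, zero_add, List.nil_append] at hb
    have hb2 : (List.foldl
        (fun (st : Int × Int) index =>
          if PySem.List.pyGetD (a :: t) index ' ' == PySem.List.pyGetD (a :: t) (index - 1) ' ' then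
            (st.1 + 1, st.2)
          else (0, if st.1 ≥ 1 then st.2 + 1 else st.2))
        (0, 0) (PySem.List.pyRange 1 (((a :: t).length : Nat) : Int))) = auxRun a (0, 0) t := hb
    rw [hb2]
    have hpw : (a :: t).Pairwise (· ≤ ·) := by
      have := PySem.List.sorted_pairwise hand.toList (fun c => c)
      rw [hs] at this
      exact this
    rw [auxRun_pairs t a 0 0 hpw, pairsOf_cons]
    by_cases h : 1 ≤ t.count a <;> simp [h]

lemma B_eq_pairsOf (hand : String) : getNumberPairs_alt hand = pairsOf hand.toList := by
  unfold getNumberPairs_alt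
  rw [PySem.Dict.foldl_insert_getD_add_one_eq_counter]
  simp only [PySem.Dict.values, PySem.Dict.items_counter, List.map_map]
  rw [PySem.List.foldl_ite_add_one (fun v => v ≥ 2)]
  rw [List.countP_map]
  unfold pairsOf
  rw [Int.zero_add]
  congr 1
  refine countP_nodup_ext _ _ (PySem.Set.nodup_ofList _) (PySem.List.nodup_dedup _)
    (fun c => by rw [PySem.Set.mem_ofList, PySem.List.mem_dedup]) (fun c _ => ?_)
  simp only [Function.comp]
  refine decide_eq_decide.mpr ?_
  constructor <;> intro h
  · exact_mod_cast h
  · exact_mod_cast h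

-- ===== VERDICT (by name: the statement is the Claim_ definition above) =====
theorem getNumberPairs_spec : Claim_equal_getNumberPairs := by
  intro hand _
  unfold Spec_getNumberPairs
  rw [A_eq_pairsOf, B_eq_pairsOf]
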